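-- pv_equiv track=rewrite | github.com/Backblaze/b2-sdk-python | b2sdk/_internal/utils/__init__.py | choose_part_ranges
-- ===== SOURCE A (Python) =====
-- def choose_part_ranges(content_length, minimum_part_size):
--     """
--     Return a list of (offset, length) for the parts of a large file.
--
--     :param content_length: content length value
--     :type content_length: int
--     :param minimum_part_size: a minimum file part size
--     :type minimum_part_size: int
--     :rtype: list
--     """
--
--     # If the file is at least twice the minimum part size, we are guaranteed
--     # to be able to break it into multiple parts that are all at least
--     # the minimum part size.
--     assert minimum_part_size * 2 <= content_length
--
--     # How many parts can we make?
--     part_count = min(content_length // minimum_part_size, 10000)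
--     assert 2 <= part_count
--
--     # All of the parts, except the last, are the same size.  The
--     # last one may be bigger.
--     part_size = content_length // part_count
--     last_part_size = content_length - (part_size * (part_count - 1))
--     assert minimum_part_size <= last_part_size
--
--     # Make all of the parts except the last
--     parts = [(i * part_size, part_size) for i in range(part_count - 1)]
--
--     # Add the last part
--     start_of_last = (part_count - 1) * part_size
--     last_part = (start_of_last, content_length - start_of_last)
--     parts.append(last_part)
--
--     return parts
-- ===== SOURCE B (Python) =====
-- def choose_part_ranges(content_length, minimum_part_size):
--     """
--     Return a list of (offset, length) for the parts of a large file.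
--
--     Builds the list back-to-front: peel the oversized tail part off first,
--     then walk the cut point down by part_size with a running subtraction
--     (no index multiplication), and reverse at the end.
--     """
--     assert minimum_part_size * 2 <= content_length
--     part_count = min(content_length // minimum_part_size, 10000)
--     assert 2 <= part_count
--     part_size = content_length // part_count
--     last_part_size = content_length - (part_size * (part_count - 1))
--     assert minimum_part_size <= last_part_size
--     parts = []
--     end = content_length
--     cut = content_length - last_part_size
--     for _ in range(part_count - 1):
--         parts.append((cut, end - cut))
--         end = cut
--         cut -= part_size
--     parts.append((0, end))
--     parts.reverse()
--     return parts
-- ===== Notes on version B (the rewrite author's own statement) =====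
-- stated objective: alternative
-- what changed: B constructs the parts back-to-front: it peels the oversized last part off the tail first, then walks a cut point downward by repeated subtraction (running accumulator, no index multiplication and no special-cased final append), and reverses the list at the end; A builds the equal parts forward with an i*part_size comprehension and appends the last part separately.
import Mathlib
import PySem

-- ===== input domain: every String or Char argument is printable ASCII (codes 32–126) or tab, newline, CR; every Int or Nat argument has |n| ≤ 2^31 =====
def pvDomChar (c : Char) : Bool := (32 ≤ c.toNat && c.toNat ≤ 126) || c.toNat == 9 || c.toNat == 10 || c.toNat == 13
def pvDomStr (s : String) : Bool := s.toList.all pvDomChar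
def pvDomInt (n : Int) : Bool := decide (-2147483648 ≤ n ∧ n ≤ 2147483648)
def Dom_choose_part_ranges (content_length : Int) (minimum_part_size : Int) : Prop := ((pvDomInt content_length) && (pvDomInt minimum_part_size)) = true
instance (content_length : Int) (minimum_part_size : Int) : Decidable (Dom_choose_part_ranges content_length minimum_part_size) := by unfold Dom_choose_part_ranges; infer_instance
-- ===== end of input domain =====

-- B builds the part list back-to-front (peel the oversized tail part, walk the cut
-- point down by repeated subtraction, reverse at the end) instead of A's forward
-- i*part_size comprehension plus special-cased last append (objective: alternative).

-- ===== PORT A =====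
def choose_part_ranges (content_length : Int) (minimum_part_size : Int) : List (Int × Int) :=
  let part_count := min (PySem.Int.floordiv content_length minimum_part_size) 10000
  let part_size := PySem.Int.floordiv content_length part_count
  let parts := (PySem.List.pyRange 0 (part_count - 1) 1).map (fun i => (i * part_size, part_size))
  let start_of_last := (part_count - 1) * part_size
  parts ++ [(start_of_last, content_length - start_of_last)]

-- ===== PORT B =====
-- one iteration of Source B's backward loop on the state (parts, end, cut)
def pvStepB (part_size : Int) (s : List (Int × Int) × Int × Int) : List (Int × Int) × Int × Int :=
  (s.1 ++ [(s.2.2, s.2.1 - s.2.2)], s.2.2, s.2.2 - part_size)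

def choose_part_ranges_alt (content_length : Int) (minimum_part_size : Int) : List (Int × Int) :=
  let part_count := min (PySem.Int.floordiv content_length minimum_part_size) 10000
  let part_size := PySem.Int.floordiv content_length part_count
  let last_part_size := content_length - part_size * (part_count - 1)
  let s := (PySem.List.pyRange 0 (part_count - 1) 1).foldl
      (fun s _ => pvStepB part_size s)
      ([], content_length, content_length - last_part_size)
  (s.1 ++ [(0, s.2.1)]).reverse

-- ===== PRECONDITION & SPEC =====
-- Pre_ excludes exactly the inputs where the Python raises: minimum_part_size = 0
-- (ZeroDivisionError) and the three asserts, written out as the same arithmetic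
-- conditions on the inputs.
def Pre_choose_part_ranges (content_length : Int) (minimum_part_size : Int) : Prop :=
  minimum_part_size ≠ 0 ∧
  minimum_part_size * 2 ≤ content_length ∧
  2 ≤ min (PySem.Int.floordiv content_length minimum_part_size) 10000 ∧
  minimum_part_size ≤ content_length -
    (PySem.Int.floordiv content_length (min (PySem.Int.floordiv content_length minimum_part_size) 10000)) *
    (min (PySem.Int.floordiv content_length minimum_part_size) 10000 - 1)
instance (content_length : Int) (minimum_part_size : Int) : Decidable (Pre_choose_part_ranges content_length minimum_part_size) := by unfold Pre_choose_part_ranges; infer_instance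
def pvWitness_choose_part_ranges : Int × Int := (10, 5)

def Spec_choose_part_ranges (content_length : Int) (minimum_part_size : Int) (out : List (Int × Int)) : Prop := out = choose_part_ranges_alt content_length minimum_part_size
instance (content_length : Int) (minimum_part_size : Int) (out : List (Int × Int)) : Decidable (Spec_choose_part_ranges content_length minimum_part_size out) := by unfold Spec_choose_part_ranges; infer_instance

-- ===== CLAIM (what is proved, stated in full; the proofs are below) =====
def Claim_equal_choose_part_ranges : Prop := ∀ (content_length : Int) (minimum_part_size : Int), Dom_choose_part_ranges content_length minimum_part_size → Pre_choose_part_ranges content_length minimum_part_size → Spec_choose_part_ranges content_length minimum_part_size (choose_part_ranges content_length minimum_part_size)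

-- ===== LEMMAS AND PROOFS =====

/-- The descending list of equal parts produced by `k` regular loop steps
starting with cut point `e - ps`. -/
def pvD (ps : Int) : Nat → Int → List (Int × Int)
  | 0, _ => []
  | k+1, e => (e - ps, ps) :: pvD ps k (e - ps)

lemma pv_foldl_const {α β : Type} (g : β → β) (l : List α) (init : β) :
    l.foldl (fun s _ => g s) init = g^[l.length] init := by
  induction l generalizing init with
  | nil => rfl
  | cons a t ih => simp [List.foldl, ih, Function.iterate_succ_apply]

lemma pv_desc (ps : Int) (k : Nat) : ∀ (P : List (Int × Int)) (e : Int),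
    (pvStepB ps)^[k] (P, e, e - ps)
      = (P ++ pvD ps k e, e - (k : Int) * ps, e - ((k : Int) + 1) * ps) := by
  induction k with
  | zero => intro P e; simp [pvD]
  | succ n ih =>
    intro P e
    rw [Function.iterate_succ_apply]
    have hstep : pvStepB ps (P, e, e - ps)
        = (P ++ [(e - ps, ps)], e - ps, (e - ps) - ps) := by
      simp [pvStepB]
    rw [hstep, ih]
    refine Prod.ext ?_ (Prod.ext ?_ ?_)
    · simp [pvD]
    · simp only []; push_cast; ring
    · simp only []; push_cast; ring

lemma pv_revD (ps : Int) (k : Nat) : ∀ (e : Int),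
    (pvD ps k e).reverse
      = (List.range k).map (fun j : Nat => (e - (k : Int) * ps + (j : Int) * ps, ps)) := by
  induction k with
  | zero => intro e; simp [pvD]
  | succ n ih =>
    intro e
    rw [pvD, List.reverse_cons, ih (e - ps), List.range_succ, List.map_append]
    congr 1
    · apply List.map_congr_left
      intro j _
      refine Prod.ext ?_ rfl
      push_cast; ring
    · simp only [List.map_cons, List.map_nil]
      refine congrArg (fun x => [x]) (Prod.ext ?_ rfl)
      push_cast; ring

-- ===== VERDICT (by name: the statement is the Claim_ definition above) =====
theorem choose_part_ranges_spec : Claim_equal_choose_part_ranges := by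
  intro cl mps _hDom hPre
  obtain ⟨hne, _h2, hpc, _hlast⟩ := hPre
  unfold Spec_choose_part_ranges choose_part_ranges choose_part_ranges_alt
  dsimp only
  set pc := min (PySem.Int.floordiv cl mps) 10000 with hpcdef
  set ps := PySem.Int.floordiv cl pc with hpsdef
  obtain ⟨m, hm⟩ : ∃ m : Nat, pc = (m : Int) + 2 := ⟨(pc - 2).toNat, by omega⟩
  have hpc1 : pc - 1 = (m : Int) + 1 := by omega
  rw [hpc1]
  have hr : PySem.List.pyRange 0 ((m : Int) + 1) 1
      = (List.range (m + 1)).map (fun k : Nat => (k : Int)) := by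
    rw [PySem.List.pyRange_one]
    have h : (((m : Int) + 1) - 0).toNat = m + 1 := by omega
    rw [h]; simp
  rw [hr]
  -- B side: evaluate the loop
  rw [pv_foldl_const (pvStepB ps)]
  simp only [List.length_map, List.length_range]
  have hinit : (([], cl, cl - (cl - ps * ((m : Int) + 1))) : List (Int × Int) × Int × Int)
      = ([], cl, ps * ((m : Int) + 1)) := by
    refine Prod.ext rfl (Prod.ext rfl ?_); ring
  rw [hinit, Function.iterate_succ_apply]
  have hstep0 : pvStepB ps ([], cl, ps * ((m : Int) + 1))
      = ([(ps * ((m : Int) + 1), cl - ps * ((m : Int) + 1))],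
         ps * ((m : Int) + 1), ps * ((m : Int) + 1) - ps) := by
    simp [pvStepB]
  rw [hstep0, pv_desc ps m]
  dsimp only
  rw [List.reverse_append, List.reverse_append, pv_revD]
  simp only [List.reverse_cons, List.reverse_nil, List.nil_append, List.cons_append]
  -- A side: split off the head of range (m+1)
  rw [List.map_map, List.range_succ_eq_map, List.map_cons, List.map_map, List.cons_append]
  congr 1
  · refine Prod.ext ?_ ?_
    · simp
    · simp; ring
  congr 1
  · apply List.map_congr_left
    intro j _
    refine Prod.ext ?_ rfl
    simp only [Function.comp_apply]
    push_cast; ring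
  · refine congrArg (fun x => [x]) (Prod.ext ?_ ?_) <;> ring
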